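-- pv_equiv track=rewrite | github.com/garymooney/qmuvi | quantum_music.py | c_major
-- ===== SOURCE A (Python) =====
-- def c_major(n):
--     C_MAJ = [0, 2, 4, 5, 7, 9, 11, 12, 14, 16, 17, 19, 21, 23, 24, 26, 28, 29, 31, 33, 35, 36, 38, 40, 41, 43, 45, 47, 48, 50, 52, 53, 55, 57, 59, 60, 62, 64, 65, 67, 69, 71, 72, 74, 76, 77, 79, 81, 83, 84, 86, 88, 89, 91, 93, 95, 96, 98, 100, 101, 103, 105, 107, 108, 110, 112, 113, 115, 117, 119, 120, 122, 124, 125, 127]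
--
--     CURR_MODE = C_MAJ
--     note = 60+n
--
--     # Shifting
--     if CURR_MODE and note < CURR_MODE[0]:
--         note = CURR_MODE[0]
--     else:
--         while (CURR_MODE and note not in CURR_MODE):
--             note -= 1
--     return note
-- ===== SOURCE B (Python) =====
-- def c_major(n):
--     # Snap 60+n down to the nearest C-major pitch via a pitch-class offset table, O(1).
--     OFFSETS = [0, 1, 0, 1, 0, 0, 1, 0, 1, 0, 1, 0]
--     note = 60 + n
--     if note < 0:
--         return 0
--     if note > 127:
--         return 127
--     return note - OFFSETS[note % 12]
-- ===== Notes on version B (the rewrite author's own statement) =====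
-- stated objective: faster
-- what changed: Replaced the decrement-until-member scan over the 75-entry C_MAJ list with clamping to [0,127] plus an O(1) pitch-class offset table lookup (note - OFFSETS[note % 12]).
import Mathlib
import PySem

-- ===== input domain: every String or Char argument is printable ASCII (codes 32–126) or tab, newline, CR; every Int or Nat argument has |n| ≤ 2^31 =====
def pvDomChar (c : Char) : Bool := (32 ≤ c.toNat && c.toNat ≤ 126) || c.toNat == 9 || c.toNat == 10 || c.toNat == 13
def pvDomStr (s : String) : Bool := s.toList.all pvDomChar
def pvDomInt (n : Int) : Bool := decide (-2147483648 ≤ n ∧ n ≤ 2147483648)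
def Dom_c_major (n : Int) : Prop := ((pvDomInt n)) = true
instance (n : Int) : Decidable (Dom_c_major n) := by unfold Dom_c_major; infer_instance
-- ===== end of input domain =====

-- B replaces A's decrement-until-member scan by clamping to [0,127] and an O(1) pitch-class offset table; return value proved equal.

-- ===== PORT A =====
def cMajList : List Int := [0, 2, 4, 5, 7, 9, 11, 12, 14, 16, 17, 19, 21, 23, 24, 26, 28, 29, 31, 33, 35, 36, 38, 40, 41, 43, 45, 47, 48, 50, 52, 53, 55, 57, 59, 60, 62, 64, 65, 67, 69, 71, 72, 74, 76, 77, 79, 81, 83, 84, 86, 88, 89, 91, 93, 95, 96, 98, 100, 101, 103, 105, 107, 108, 110, 112, 113, 115, 117, 119, 120, 122, 124, 125, 127]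

-- the while loop: entered only with note ≥ 0 (else-branch of `note < CURR_MODE[0]`),
-- so it is recursion on note.toNat; the k = 0 base coincides with 0 ∈ C_MAJ.
def cMajLoop : Nat → Int
  | 0 => 0
  | k + 1 => if ((k + 1 : Nat) : Int) ∈ cMajList then (k + 1 : Nat) else cMajLoop k

def c_major (n : Int) : Int :=
  let note := 60 + n
  if note < 0 then 0 else cMajLoop note.toNat

-- ===== PORT B =====
def cMajOffsets : List Int := [0, 1, 0, 1, 0, 0, 1, 0, 1, 0, 1, 0]

def c_major_alt (n : Int) : Int :=
  let note := 60 + n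
  if note < 0 then 0
  else if note > 127 then 127
  else note - cMajOffsets.getD (note % 12).toNat 0

-- ===== PRECONDITION & SPEC =====
def Spec_c_major (n : Int) (out : Int) : Prop := out = c_major_alt n
instance (n : Int) (out : Int) : Decidable (Spec_c_major n out) := by unfold Spec_c_major; infer_instance

-- ===== CLAIM (what is proved, stated in full; the proofs are below) =====
def Claim_equal_c_major : Prop := ∀ (n : Int), Dom_c_major n → Spec_c_major n (c_major n)

-- ===== LEMMAS AND PROOFS =====
theorem cMajLoop_small : ∀ k < 128, cMajLoop k = (k : Int) - cMajOffsets.getD (k % 12) 0 := by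
  decide

theorem cMajLoop_big : ∀ k : Nat, 127 ≤ k → cMajLoop k = 127 := by
  intro k hk
  induction k with
  | zero => omega
  | succ m ih =>
    by_cases h : m + 1 = 127
    · rw [h]; decide
    · have hm : ¬ (((m + 1 : Nat) : Int) ∈ cMajList) := by
        intro hmem
        have hb : ∀ x ∈ cMajList, x ≤ 127 := by decide
        have : ((m + 1 : Nat) : Int) ≤ 127 := hb _ hmem
        omega
      rw [cMajLoop, if_neg hm]
      exact ih (by omega)

-- ===== VERDICT (by name: the statement is the Claim_ definition above) =====
theorem c_major_spec : Claim_equal_c_major := by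
  intro n _
  unfold Spec_c_major c_major c_major_alt
  simp only []
  by_cases h0 : 60 + n < 0
  · simp [h0]
  · rw [if_neg h0, if_neg h0]
    by_cases h1 : 60 + n > 127
    · rw [if_pos h1, cMajLoop_big (60 + n).toNat (by omega)]
    · rw [if_neg h1]
      have hk : (60 + n).toNat < 128 := by omega
      have := cMajLoop_small (60 + n).toNat hk
      rw [this]
      have h2 : ((60 + n).toNat : Int) = 60 + n := by omega
      have h3 : (60 + n).toNat % 12 = ((60 + n) % 12).toNat := by omega
      rw [h2, h3]
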